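-- pv_equiv track=rewrite | github.com/ShujiaHuang/geneview | geneview/baseplot/_venn.py | is_already_venn_dataset
-- ===== SOURCE A (Python) =====
-- def _generate_logics(n_sets):
--     """Generate intersection identifiers in binary (0010 etc)"""
--     for i in range(1, 2 ** n_sets):
--         yield bin(i)[2:].zfill(n_sets)
--
-- def is_already_venn_dataset(petal_labels, dataset_labels):
--     if not isinstance(dataset_labels, list):
--         return False
--
--     if not (hasattr(petal_labels, "keys") and hasattr(petal_labels, "values")):
--         return False
--
--     n_sets = len(dataset_labels)
--     petal_labels_set = set(_generate_logics(n_sets))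
--     valid = True
--     for logic in petal_labels.keys():
--         if not isinstance(petal_labels[logic], str):
--             valid = False
--         if len(logic) != n_sets:
--             valid = False
--         if not (set(logic) <= {"0", "1"}):
--             valid = False
--         if logic not in petal_labels_set:
--             valid = False
--         if not valid:
--             break
--
--     return valid
-- ===== SOURCE B (Python) =====
-- def is_already_venn_dataset(petal_labels, dataset_labels):
--     if not isinstance(dataset_labels, list):
--         return False
--     if not (hasattr(petal_labels, "keys") and hasattr(petal_labels, "values")):
--         return False
--     n_sets = len(dataset_labels)
--     # a key is valid iff it is a length-n_sets binary string that is not all zeros;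
--     # no need to enumerate the 2**n_sets intersection identifiers
--     return all(
--         isinstance(value, str)
--         and len(logic) == n_sets
--         and all(c in "01" for c in logic)
--         and "1" in logic
--         for logic, value in petal_labels.items()
--     )
-- ===== Notes on version B (the rewrite author's own statement) =====
-- stated objective: faster
-- what changed: B drops A's enumeration of all 2**n_sets binary intersection identifiers into a set and instead validates each key directly as 'length == n_sets, characters all in {0,1}, contains a 1', which characterizes membership exactly.
import Mathlib
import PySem

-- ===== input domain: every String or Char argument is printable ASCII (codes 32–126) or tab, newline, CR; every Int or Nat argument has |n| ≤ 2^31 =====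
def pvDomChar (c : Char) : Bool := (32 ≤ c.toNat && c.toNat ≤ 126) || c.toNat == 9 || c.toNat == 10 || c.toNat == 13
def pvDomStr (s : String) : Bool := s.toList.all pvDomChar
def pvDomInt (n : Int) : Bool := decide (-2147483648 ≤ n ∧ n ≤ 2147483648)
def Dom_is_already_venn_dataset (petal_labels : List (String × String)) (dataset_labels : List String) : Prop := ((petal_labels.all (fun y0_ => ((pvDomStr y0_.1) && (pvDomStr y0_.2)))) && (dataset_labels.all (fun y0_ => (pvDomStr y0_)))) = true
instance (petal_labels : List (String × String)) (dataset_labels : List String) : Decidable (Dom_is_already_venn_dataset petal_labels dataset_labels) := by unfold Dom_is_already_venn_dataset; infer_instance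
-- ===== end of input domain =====

-- B replaces A's enumeration of all 2**n_sets binary identifiers by a direct per-key test
-- (length n_sets, chars in {0,1}, not all zeros); objective: faster (no exponential set build).

-- ===== PORT A =====
-- _generate_logics(n_sets): bin(i)[2:].zfill(n_sets) for i in range(1, 2 ** n_sets)
def genLogics (n_sets : Nat) : List String :=
  (PySem.List.pyRange 1 ((2 : Int) ^ n_sets) 1).map
    (fun i => PySem.Str.zfill (PySem.Int.toBin i) (n_sets : Int))

-- the for-loop over petal_labels.keys(): each `if cond: valid = False` in source order, then
-- `if not valid: break` and finally `return valid`.  The first check,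
-- `isinstance(petal_labels[logic], str)`, can never set valid to False here because under the
-- type convention every value of the dict is a String; it is kept as a comment.
def vennLoop (petal_labels_set : PySem.Set String) (n_sets : Nat) : List String → Bool
  | [] => true
  | logic :: rest =>
    let valid := true
    -- if not isinstance(petal_labels[logic], str): valid = False   (never fires: values are str)
    let valid := if PySem.Str.len logic != (n_sets : Int) then false else valid
    let valid := if !(PySem.Set.issubset (PySem.Set.ofList logic.toList) (PySem.Set.ofList ['0', '1'])) then false else valid
    let valid := if !(PySem.Set.contains petal_labels_set logic) then false else valid
    if !valid then valid else vennLoop petal_labels_set n_sets rest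

def is_already_venn_dataset (petal_labels : List (String × String)) (dataset_labels : List String) : Bool :=
  -- `isinstance(dataset_labels, list)` and the hasattr keys/values checks always hold under the
  -- type convention (dataset_labels is a list, petal_labels a dict); both guards fall away.
  let n_sets := dataset_labels.length
  let petal_labels_set := PySem.Set.ofList (genLogics n_sets)
  vennLoop petal_labels_set n_sets (PySem.Dict.ofList petal_labels).keys

-- ===== PORT B =====
def is_already_venn_dataset_alt (petal_labels : List (String × String)) (dataset_labels : List String) : Bool :=
  -- the two type guards of Source B always hold under the type convention; likewise
  -- `isinstance(value, str)` is always true.  `c in "01"` and `"1" in logic` are ported as the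
  -- character tests they are (exact: the needles are single characters).
  let n_sets := dataset_labels.length
  (PySem.Dict.ofList petal_labels).items.all (fun kv =>
    (PySem.Str.len kv.1 == (n_sets : Int)) &&
    kv.1.toList.all (fun c => c == '0' || c == '1') &&
    kv.1.toList.contains '1')

-- ===== PRECONDITION & SPEC =====
def Spec_is_already_venn_dataset (petal_labels : List (String × String)) (dataset_labels : List String) (out : Bool) : Prop := out = is_already_venn_dataset_alt petal_labels dataset_labels
instance (petal_labels : List (String × String)) (dataset_labels : List String) (out : Bool) : Decidable (Spec_is_already_venn_dataset petal_labels dataset_labels out) := by unfold Spec_is_already_venn_dataset; infer_instance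

-- ===== CLAIM (what is proved, stated in full; the proofs are below) =====
def Claim_equal_is_already_venn_dataset : Prop := ∀ (petal_labels : List (String × String)) (dataset_labels : List String), Dom_is_already_venn_dataset petal_labels dataset_labels → Spec_is_already_venn_dataset petal_labels dataset_labels (is_already_venn_dataset petal_labels dataset_labels)

-- ===== LEMMAS AND PROOFS =====

-- `bits m` = the binary digits of m (empty for 0), most significant first.
def bits : Nat → List Char
  | 0 => []
  | m + 1 => bits ((m + 1) / 2) ++ [if (m + 1) % 2 = 1 then '1' else '0']

-- numeric value of a 0/1 character list
def bval (cs : List Char) : Nat := cs.foldl (fun a c => 2 * a + (if c = '1' then 1 else 0)) 0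

lemma bits_pos (m : Nat) (hm : 0 < m) :
    bits m = bits (m / 2) ++ [if m % 2 = 1 then '1' else '0'] := by
  cases m with
  | zero => omega
  | succ k => simp [bits]

lemma toDigitsCore_eq_bits : ∀ (f m : Nat) (acc : List Char), 0 < m → m < 2 ^ f →
    Nat.toDigitsCore 2 f m acc = bits m ++ acc := by
  intro f
  induction f with
  | zero => intro m acc h1 h2; simp at h2; omega
  | succ f ih =>
    intro m acc h1 h2
    rw [Nat.toDigitsCore]
    by_cases hdiv : m / 2 = 0
    · have hm1 : m = 1 := by omega
      subst hm1
      simp [bits, hdiv]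
      decide
    · rw [if_neg hdiv, ih (m / 2) _ (by omega) (by
        have : 2 ^ (f + 1) = 2 ^ f * 2 := by ring
        omega)]
      rw [bits_pos m h1, List.append_assoc]
      congr 1
      have : m % 2 = 0 ∨ m % 2 = 1 := by omega
      rcases this with h | h <;> simp [h, Nat.digitChar]

lemma toDigits_eq_bits (m : Nat) (hm : 0 < m) : Nat.toDigits 2 m = bits m := by
  have : m < 2 ^ (m + 1) := lt_trans Nat.lt_two_pow_self (by
    exact Nat.pow_lt_pow_right (by omega) (by omega))
  simpa using toDigitsCore_eq_bits (m + 1) m [] hm this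

lemma bits_head (m : Nat) (hm : 0 < m) : ∃ t, bits m = '1' :: t := by
  induction m using Nat.strong_induction_on with
  | _ m ih =>
    by_cases hdiv : m / 2 = 0
    · have hm1 : m = 1 := by omega
      subst hm1
      exact ⟨[], by simp [bits]⟩
    · obtain ⟨t, ht⟩ := ih (m / 2) (by omega) (by omega)
      exact ⟨t ++ [if m % 2 = 1 then '1' else '0'], by rw [bits_pos m hm, ht]; simp⟩

lemma bval_append_singleton (cs : List Char) (c : Char) :
    bval (cs ++ [c]) = 2 * bval cs + (if c = '1' then 1 else 0) := by
  simp [bval]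

lemma bval_lt (cs : List Char) : bval cs < 2 ^ cs.length := by
  induction cs using List.reverseRecOn with
  | nil => simp [bval]
  | append_singleton s c ih =>
    rw [bval_append_singleton]
    simp only [List.length_append, List.length_singleton]
    have : 2 ^ (s.length + 1) = 2 ^ s.length * 2 := by ring
    split <;> omega

lemma bval_pos (cs : List Char) (h : '1' ∈ cs) : 0 < bval cs := by
  induction cs using List.reverseRecOn with
  | nil => simp at h
  | append_singleton s c ih =>
    rw [bval_append_singleton]
    rcases List.mem_append.mp h with h' | h'
    · have := ih h'; omega
    · simp at h'; simp [← h']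

lemma bval_replicate_zero_append (j : Nat) (cs : List Char) :
    bval (List.replicate j '0' ++ cs) = bval cs := by
  induction j with
  | zero => simp
  | succ j ih =>
    rw [List.replicate_succ, List.cons_append]
    simpa [bval] using ih

lemma bits_bval (t : List Char) (hh : ∃ r, t = '1' :: r) (hch : ∀ c ∈ t, c = '0' ∨ c = '1') :
    bits (bval t) = t := by
  induction t using List.reverseRecOn with
  | nil => obtain ⟨r, hr⟩ := hh; simp at hr
  | append_singleton s c ih =>
    by_cases hs : s = []
    · subst hs
      obtain ⟨r, hr⟩ := hh
      simp at hr
      simp [hr.1, bval, bits]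
    · have hh' : ∃ r, s = '1' :: r := by
        obtain ⟨r, hr⟩ := hh
        cases s with
        | nil => exact absurd rfl hs
        | cons a s' => simp at hr; exact ⟨s', by rw [hr.1]⟩
      have hch' : ∀ c ∈ s, c = '0' ∨ c = '1' := fun c hc => hch c (by simp [hc])
      have hpos : 0 < bval s := bval_pos s (by obtain ⟨r, hr⟩ := hh'; simp [hr])
      rw [bval_append_singleton]
      have hb : (if c = '1' then 1 else 0) < 2 := by split <;> omega
      rw [bits_pos _ (by omega)]
      have hdiv : (2 * bval s + (if c = '1' then 1 else 0)) / 2 = bval s := by omega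
      have hmod : (2 * bval s + (if c = '1' then 1 else 0)) % 2 = (if c = '1' then 1 else 0) := by
        omega
      rw [hdiv, hmod, ih hh' hch']
      congr 1
      rcases hch c (by simp) with h | h <;> simp [h]

lemma zfill_cons_one (t : List Char) (n : Nat) :
    PySem.Chars.zfill ('1' :: t) (n : Int) = List.replicate (n - (t.length + 1)) '0' ++ '1' :: t := by
  rw [PySem.Chars.zfill]
  by_cases h : (n : Int) ≤ (('1' :: t).length : Int)
  · rw [if_pos h]
    have : n - (t.length + 1) = 0 := by simp at h; omega
    simp [this]
  · rw [if_neg h]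
    simp only [List.length_cons]
    have h1 : ¬('1' = '+' ∨ '1' = '-') := by decide
    rw [if_neg h1]
    simp

-- the key characterization: membership in A's generated set = "has a one", for a string of the
-- right length over {'0','1'}
lemma mem_genLogics {n : Nat} {k : String} (hlen : k.toList.length = n)
    (hch : ∀ c ∈ k.toList, c = '0' ∨ c = '1') :
    k ∈ genLogics n ↔ '1' ∈ k.toList := by
  constructor
  · intro hk
    obtain ⟨i, hi, hk⟩ := List.mem_map.mp hk
    obtain ⟨hi1, hi2⟩ := PySem.List.mem_pyRange_one.mp hi
    have hm : 0 < i.toNat := by omega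
    have htb : (PySem.Int.toBin i).toList = bits i.toNat := by
      rw [PySem.Int.toList_toBin, PySem.Int.toBinChars, if_neg (by omega), toDigits_eq_bits _ hm]
    obtain ⟨t, ht⟩ := bits_head i.toNat hm
    have : k.toList = List.replicate (n - (t.length + 1)) '0' ++ '1' :: t := by
      rw [← hk, PySem.Str.toList_zfill, htb, ht, zfill_cons_one]
    rw [this]
    simp
  · intro h1
    set cs := k.toList with hcs
    set t := cs.dropWhile (fun c => c == '0') with ht
    have hsplit : cs.takeWhile (fun c => c == '0') ++ t = cs := List.takeWhile_append_dropWhile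
    have htake : cs.takeWhile (fun c => c == '0') = List.replicate (cs.takeWhile (fun c => c == '0')).length '0' := by
      apply List.eq_replicate_of_mem
      intro c hc
      have := List.mem_takeWhile_imp hc
      simpa using this
    have h1t : '1' ∈ t := by
      rcases List.mem_append.mp (hsplit ▸ h1) with h | h
      · rw [htake] at h; simp at h
      · exact h
    have htne : t ≠ [] := by intro h; rw [h] at h1t; simp at h1t
    obtain ⟨a, r0, har⟩ := List.exists_cons_of_ne_nil htne
    have hhead : ∃ r, t = '1' :: r := by
      have ha := List.head?_dropWhile_not (fun c => c == '0') cs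
      rw [← ht, har] at ha
      simp at ha
      have hmem : a = '0' ∨ a = '1' := hch a (by rw [← hsplit, har]; simp)
      rcases hmem with h | h
      · exact absurd h ha
      · exact ⟨r0, by rw [har, h]⟩
    have hcht : ∀ c ∈ t, c = '0' ∨ c = '1' := fun c hc =>
      hch c (by rw [← hsplit]; simp [hc])
    set m := bval cs with hm
    have hmv : bval t = m := by
      rw [hm, ← hsplit, htake, bval_replicate_zero_append]
    have hmpos : 0 < m := by rw [hm]; exact bval_pos cs h1
    have hmlt : m < 2 ^ n := by rw [hm, ← hlen]; exact bval_lt cs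
    apply List.mem_map.mpr
    refine ⟨(m : Int), PySem.List.mem_pyRange_one.mpr ⟨by omega, by exact_mod_cast hmlt⟩, ?_⟩
    apply String.toList_inj.mp
    rw [PySem.Str.toList_zfill, PySem.Int.toList_toBin, PySem.Int.toBinChars,
      if_neg (by omega)]
    have : ((m : Int)).toNat = m := by omega
    rw [this, toDigits_eq_bits m hmpos]
    have hbits : bits m = t := by rw [← hmv]; exact bits_bval t hhead hcht
    obtain ⟨r, hr⟩ := hhead
    rw [hbits, hr, zfill_cons_one]
    rw [← hcs, ← hsplit, htake, hr]
    have hlen2 : (cs.takeWhile (fun c => c == '0')).length + (r.length + 1) = n := by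
      have := congrArg List.length hsplit
      simp [hr] at this
      omega
    congr 2
    omega

-- per-key equality of the two checks
lemma if_chain (a b c : Bool) :
    (if a then false else if b then false else if c then false else true) = (!a && !b && !c) := by
  cases a <;> cases b <;> cases c <;> rfl

lemma key_check_eq (n : Nat) (k : String) :
    ((if PySem.Str.len k != (n : Int) then false else
      if !(PySem.Set.issubset (PySem.Set.ofList k.toList) (PySem.Set.ofList ['0', '1'])) then false else
      if !(PySem.Set.contains (PySem.Set.ofList (genLogics n)) k) then false else true) : Bool)
    = ((PySem.Str.len k == (n : Int)) &&
       k.toList.all (fun c => c == '0' || c == '1') &&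
       k.toList.contains '1') := by
  have hsub : PySem.Set.issubset (PySem.Set.ofList k.toList) (PySem.Set.ofList ['0', '1'])
      = k.toList.all (fun c => c == '0' || c == '1') := by
    apply Bool.eq_iff_iff.mpr
    simp only [PySem.Set.issubset, PySem.Set.contains, List.all_eq_true, List.contains_iff_mem]
    constructor
    · intro h c hc
      have h1 := h c ((PySem.Set.mem_ofList k.toList c).mpr hc)
      have h2 := (PySem.Set.mem_ofList ['0', '1'] c).mp h1
      simp at h2
      rcases h2 with h' | h' <;> simp [h']
    · intro h c hc
      have hc' := (PySem.Set.mem_ofList k.toList c).mp hc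
      have h1 := h c hc'
      apply (PySem.Set.mem_ofList ['0', '1'] c).mpr
      simp at h1 ⊢
      rcases h1 with h' | h' <;> simp [h']
  have h1 : (!(PySem.Str.len k != (n : Int))) = (PySem.Str.len k == (n : Int)) := by
    simp only [bne, Bool.not_not]
  rw [if_chain, h1, Bool.not_not, Bool.not_not, hsub]
  by_cases hx : ((PySem.Str.len k == (n : Int)) && k.toList.all (fun c => c == '0' || c == '1')) = true
  · obtain ⟨hlen, hch⟩ := Bool.and_eq_true_iff.mp hx
    have hch' : ∀ c ∈ k.toList, c = '0' ∨ c = '1' := by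
      intro c hc
      have hc2 := (List.all_eq_true.mp hch) c hc
      simp at hc2
      rcases hc2 with h | h <;> simp [h]
    have hlen' : k.toList.length = n := by
      have := beq_iff_eq.mp hlen
      simp [PySem.Str.len] at this
      exact_mod_cast this
    have hmem : PySem.Set.contains (PySem.Set.ofList (genLogics n)) k
        = k.toList.contains '1' := by
      apply Bool.eq_iff_iff.mpr
      simp only [PySem.Set.contains, List.contains_iff_mem]
      rw [show (k ∈ PySem.Set.ofList (genLogics n)) ↔ k ∈ genLogics n from
        PySem.Set.mem_ofList _ _]
      exact mem_genLogics hlen' hch'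
    rw [hmem]
  · have hx' : ((PySem.Str.len k == (n : Int)) && k.toList.all (fun c => c == '0' || c == '1')) = false :=
      Bool.eq_false_iff.mpr hx
    rw [hx']
    simp

lemma vennLoop_eq_all (S : PySem.Set String) (n : Nat) (ks : List String) :
    vennLoop S n ks = ks.all (fun k =>
      if PySem.Str.len k != (n : Int) then false else
      if !(PySem.Set.issubset (PySem.Set.ofList k.toList) (PySem.Set.ofList ['0', '1'])) then false else
      if !(PySem.Set.contains S k) then false else true) := by
  induction ks with
  | nil => rfl
  | cons k ks ih =>
    rw [List.all_cons, ← ih]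
    simp only [vennLoop]
    cases h1 : (PySem.Str.len k != (n : Int)) <;>
      cases h2 : (!(PySem.Set.issubset (PySem.Set.ofList k.toList) (PySem.Set.ofList ['0', '1']))) <;>
      cases h3 : (!(PySem.Set.contains S k)) <;>
      simp

-- ===== VERDICT (by name: the statement is the Claim_ definition above) =====
theorem is_already_venn_dataset_spec : Claim_equal_is_already_venn_dataset := by
  intro petal_labels dataset_labels _
  unfold Spec_is_already_venn_dataset is_already_venn_dataset is_already_venn_dataset_alt
  rw [vennLoop_eq_all, PySem.Dict.keys, List.all_map]
  apply List.all_congr rfl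
  intro kv
  simp only [Function.comp]
  exact key_check_eq dataset_labels.length kv.1
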